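-- pv_equiv track=rewrite | github.com/thiagopelizoni/ProjectEuler | src/problem_473.py | search_skewed
-- ===== SOURCE A (Python) =====
-- def get_F(i, F):
--     if i >= 0:
--         return F[i]
--     n = -i
--     return (-1)**(n+1) * F[n]
--
-- def get_L(i, L):
--     if i >= 0:
--         return L[i]
--     n = -i
--     return (-1)**n * L[n]
--
-- def search_skewed(limit, max_exp, F, L, exponent=0, sum_L=0, sum_F=0):
--     if sum_L > 2 * limit:
--         return 0
--     result = 0
--     if sum_F == 0:
--         n = sum_L // 2
--         if 1 <= n <= limit:
--             result += n
--     if exponent == 0: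
--         exponent = 1
--     else:
--         exponent += 2
--     while exponent <= max_exp:
--         pos = exponent
--         neg = -(exponent + 1)
--         new_L = sum_L + get_L(pos, L) + get_L(neg, L)
--         new_F = sum_F + get_F(pos, F) + get_F(neg, F)
--         result += search_skewed(limit, max_exp, F, L, exponent + 1, new_L, new_F)
--         exponent += 1
--     return result
-- ===== SOURCE B (Python) =====
-- def get_F(i, F):
--     if i >= 0:
--         return F[i]
--     n = -i
--     return (-1)**(n+1) * F[n]
--
-- def get_L(i, L):
--     if i >= 0:
--         return L[i]
--     n = -i
--     return (-1)**n * L[n]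
--
-- def search_skewed(limit, max_exp, F, L, exponent=0, sum_L=0, sum_F=0):
--     # iterative DFS over an explicit stack instead of recursion + while loop
--     total = 0
--     stack = [(exponent, sum_L, sum_F)]
--     while stack:
--         e, sL, sF = stack.pop()
--         if sL > 2 * limit:
--             continue
--         if sF == 0:
--             n = sL // 2
--             if 1 <= n <= limit:
--                 total += n
--         e = 1 if e == 0 else e + 2
--         for p in range(e, max_exp + 1):
--             stack.append((p + 1,
--                           sL + get_L(p, L) + get_L(-(p + 1), L),
--                           sF + get_F(p, F) + get_F(-(p + 1), F)))
--     return total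
-- ===== Notes on version B (the rewrite author's own statement) =====
-- stated objective: alternative
-- what changed: The recursive pruned search (recursion + inner while loop) is replaced by an iterative depth-first traversal over an explicit stack of (exponent, sum_L, sum_F) states with a single running total.
import Mathlib
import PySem

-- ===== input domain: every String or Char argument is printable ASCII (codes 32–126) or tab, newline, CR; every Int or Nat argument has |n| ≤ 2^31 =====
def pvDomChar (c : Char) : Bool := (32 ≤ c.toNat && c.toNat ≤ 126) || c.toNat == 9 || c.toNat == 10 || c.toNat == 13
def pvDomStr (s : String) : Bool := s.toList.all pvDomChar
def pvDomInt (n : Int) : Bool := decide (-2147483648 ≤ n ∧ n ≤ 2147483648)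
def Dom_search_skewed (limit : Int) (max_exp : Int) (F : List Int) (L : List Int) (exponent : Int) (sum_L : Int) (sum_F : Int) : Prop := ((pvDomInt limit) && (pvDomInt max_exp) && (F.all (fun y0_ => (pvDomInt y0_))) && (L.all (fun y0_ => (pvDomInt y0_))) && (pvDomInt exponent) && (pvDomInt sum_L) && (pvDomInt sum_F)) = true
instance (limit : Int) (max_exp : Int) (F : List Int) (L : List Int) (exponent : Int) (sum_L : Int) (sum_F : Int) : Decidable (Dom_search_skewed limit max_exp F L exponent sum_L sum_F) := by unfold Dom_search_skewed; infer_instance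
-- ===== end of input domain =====

-- B replaces the recursion + inner while loop by an iterative explicit-stack DFS (alternative decomposition, same cost).

-- ===== PORT A =====
-- shared helpers get_F / get_L (identical in Source A and Source B); the list access F[n]
-- is ported as (pyGet? …).getD 0 — the 'none = IndexError' inputs are excluded by Pre_.
def pget_F (i : Int) (F : List Int) : Int :=
  if 0 ≤ i then (PySem.List.pyGet? F i).getD 0
  else
    let n := -i
    (-1) ^ ((n + 1).toNat) * (PySem.List.pyGet? F n).getD 0

def pget_L (i : Int) (L : List Int) : Int :=
  if 0 ≤ i then (PySem.List.pyGet? L i).getD 0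
  else
    let n := -i
    (-1) ^ (n.toNat) * (PySem.List.pyGet? L n).getD 0

-- arithmetic facts for the termination measures (cited by the decreasing_by of the ports;
-- proved with elementary lemmas to keep the proof terms small)
theorem pvDecA (max_exp exponent : Int) :
    2 * (max_exp + 2 - (if exponent = 0 then (1 : Int) else exponent + 2)).toNat <
      2 * (max_exp + 2 - exponent).toNat + 1 := by
  refine Nat.lt_succ_of_le (Nat.mul_le_mul_left 2 (Int.toNat_le_toNat (sub_le_sub_left ?_ _)))
  split
  next h => rw [h]; exact zero_le_one
  next h => exact le_add_of_nonneg_right zero_le_two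

theorem pvToNatSucc (c : Int) (h : 0 ≤ c) : (c + 1).toNat = c.toNat + 1 := by
  rw [Int.toNat_add h zero_le_one, Int.toNat_one]

theorem pvDecW1 (max_exp exponent : Int) (h : exponent ≤ max_exp) :
    2 * (max_exp + 2 - (exponent + 1)).toNat + 1 < 2 * (max_exp + 2 - exponent).toNat := by
  have h2 : 0 ≤ max_exp + 2 - (exponent + 1) :=
    sub_nonneg.mpr (add_le_add h one_le_two)
  have h3 : max_exp + 2 - exponent = (max_exp + 2 - (exponent + 1)) + 1 := by ring
  rw [h3, pvToNatSucc _ h2, Nat.mul_succ]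
  exact Nat.add_lt_add_left one_lt_two _

theorem pvDecW2 (max_exp exponent : Int) (h : exponent ≤ max_exp) :
    2 * (max_exp + 2 - (exponent + 1)).toNat < 2 * (max_exp + 2 - exponent).toNat := by
  have h2 : 0 ≤ max_exp + 2 - (exponent + 1) :=
    sub_nonneg.mpr (add_le_add h one_le_two)
  have h3 : max_exp + 2 - exponent = (max_exp + 2 - (exponent + 1)) + 1 := by ring
  rw [h3, pvToNatSucc _ h2, Nat.mul_succ]
  exact Nat.lt_add_of_pos_right zero_lt_two

mutual
-- A's recursion, literally; the while loop is the helper searchWhileA below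
def search_skewed (limit : Int) (max_exp : Int) (F : List Int) (L : List Int) (exponent : Int) (sum_L : Int) (sum_F : Int) : Int :=
  if 2 * limit < sum_L then 0
  else
    let result : Int :=
      if sum_F = 0 then
        let n := PySem.Int.floordiv sum_L 2
        if 1 ≤ n ∧ n ≤ limit then n else 0
      else 0
    let e := if exponent = 0 then 1 else exponent + 2
    result + searchWhileA limit max_exp F L e sum_L sum_F
  termination_by 2 * (max_exp + 2 - exponent).toNat + 1
  decreasing_by exact pvDecA max_exp exponent

-- the 'while exponent <= max_exp' loop of A, accumulating the recursive calls
def searchWhileA (limit : Int) (max_exp : Int) (F : List Int) (L : List Int) (exponent : Int) (sum_L : Int) (sum_F : Int) : Int :=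
  if exponent ≤ max_exp then
    let new_L := sum_L + pget_L exponent L + pget_L (-(exponent + 1)) L
    let new_F := sum_F + pget_F exponent F + pget_F (-(exponent + 1)) F
    search_skewed limit max_exp F L (exponent + 1) new_L new_F
      + searchWhileA limit max_exp F L (exponent + 1) sum_L sum_F
  else 0
  termination_by 2 * (max_exp + 2 - exponent).toNat
  decreasing_by
    · exact pvDecW1 max_exp exponent (by assumption)
    · exact pvDecW2 max_exp exponent (by assumption)
end

-- termination lemma for altLoop's stack measure: the children of a node weigh strictly
-- less than the node (cited by altLoop's decreasing_by)
theorem pvRangeWeight (M : Int) : ∀ (k : Nat) (d : Int), (M + 1 - d).toNat = k →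
    (List.map (fun p => 2 ^ ((M + 2 - (p + 1)).toNat)) (PySem.List.pyRange d (M + 1) 1)).sum
      < 2 ^ ((M + 2 - d).toNat) := by
  intro k
  induction k with
  | zero =>
    intro d h
    rw [PySem.List.pyRange_one_eq_nil (sub_nonpos.mp (Int.toNat_eq_zero.mp h))]
    simp only [List.map_nil, List.sum_nil]
    exact Nat.two_pow_pos _
  | succ k ih =>
    intro d h
    have hpos : 0 < M + 1 - d := by
      by_contra hc
      rw [Int.toNat_eq_zero.mpr (not_lt.mp hc)] at h
      exact Nat.succ_ne_zero k h.symm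
    have hc1 : M + 1 - d = (k : Int) + 1 := by
      rw [← Int.toNat_of_nonneg hpos.le, h]
      push_cast
      rfl
    rw [PySem.List.pyRange_one_cons (Int.lt_of_sub_pos hpos)]
    simp only [List.map_cons, List.sum_cons]
    have hd := ih (d + 1) (by
      rw [show M + 1 - (d + 1) = (M + 1 - d) - 1 from by ring, hc1,
        show (k : Int) + 1 - 1 = (k : Int) from by ring]
      exact Int.toNat_natCast k)
    have h2 : 0 ≤ M + 2 - (d + 1) := by
      rw [show M + 2 - (d + 1) = M + 1 - d from by ring]
      exact hpos.le
    have h3 : (M + 2 - d).toNat = (M + 2 - (d + 1)).toNat + 1 := by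
      rw [show M + 2 - d = (M + 2 - (d + 1)) + 1 from by ring, pvToNatSucc _ h2]
    rw [h3, pow_succ, Nat.mul_two]
    exact Nat.add_lt_add_left hd _

-- ===== PORT B =====
-- Source B's stack loop: pop a state, prune / count, push all children; head of the list is the top of the stack
def altLoop (limit : Int) (max_exp : Int) (F : List Int) (L : List Int) (stack : List (Int × Int × Int)) (total : Int) : Int :=
  match stack with
  | [] => total
  | (e, sL, sF) :: rest =>
    if 2 * limit < sL then altLoop limit max_exp F L rest total
    else
      let total' : Int :=
        if sF = 0 then
          let n := PySem.Int.floordiv sL 2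
          if 1 ≤ n ∧ n ≤ limit then total + n else total
        else total
      let d := if e = 0 then 1 else e + 2
      let children := (PySem.List.pyRange d (max_exp + 1) 1).map
        (fun p => (p + 1, sL + pget_L p L + pget_L (-(p + 1)) L,
                          sF + pget_F p F + pget_F (-(p + 1)) F))
      altLoop limit max_exp F L (children.reverse ++ rest) total'
  termination_by (stack.map (fun t => 2 ^ ((max_exp + 2 - t.1).toNat))).sum
  decreasing_by
    · simp only [List.map_cons, List.sum_cons]
      exact Nat.lt_add_of_pos_left (Nat.two_pow_pos _)
    · simp only [List.map_append, List.map_reverse, List.sum_append, List.sum_reverse,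
        List.map_map, Function.comp_def, List.map_cons, List.sum_cons, dite_eq_ite]
      refine Nat.add_lt_add_right
        (Nat.lt_of_lt_of_le (pvRangeWeight max_exp _ _ rfl)
          (Nat.pow_le_pow_right (by decide)
            (Int.toNat_le_toNat (sub_le_sub_left ?_ _)))) _
      split
      next hme => rw [hme]; exact zero_le_one
      next hme => exact le_add_of_nonneg_right zero_le_two

def search_skewed_alt (limit : Int) (max_exp : Int) (F : List Int) (L : List Int) (exponent : Int) (sum_L : Int) (sum_F : Int) : Int :=
  altLoop limit max_exp F L [(exponent, sum_L, sum_F)] 0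

-- ===== PRECONDITION & SPEC =====
-- Pre_ excludes exactly the inputs on which A raises IndexError: when the node is not
-- pruned and its exponent range is nonempty, A reads F/L at every index up to max_exp+1
-- (and down to the normalized start exponent), so both lists must be long enough.
def Pre_search_skewed (limit : Int) (max_exp : Int) (F : List Int) (L : List Int) (exponent : Int) (sum_L : Int) (sum_F : Int) : Prop :=
  let d := if exponent = 0 then 1 else exponent + 2
  2 * limit < sum_L ∨ max_exp < d ∨
    (max_exp + 2 ≤ (F.length : Int) ∧ max_exp + 2 ≤ (L.length : Int) ∧
     1 - d ≤ (F.length : Int) ∧ 1 - d ≤ (L.length : Int))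
instance (limit : Int) (max_exp : Int) (F : List Int) (L : List Int) (exponent : Int) (sum_L : Int) (sum_F : Int) : Decidable (Pre_search_skewed limit max_exp F L exponent sum_L sum_F) := by unfold Pre_search_skewed; infer_instance

def pvWitness_search_skewed : Int × Int × List Int × List Int × Int × Int × Int :=
  (3, 1, [1, 1, 1], [2, 1, 3], 0, 0, 0)

def Spec_search_skewed (limit : Int) (max_exp : Int) (F : List Int) (L : List Int) (exponent : Int) (sum_L : Int) (sum_F : Int) (out : Int) : Prop := out = search_skewed_alt limit max_exp F L exponent sum_L sum_F
instance (limit : Int) (max_exp : Int) (F : List Int) (L : List Int) (exponent : Int) (sum_L : Int) (sum_F : Int) (out : Int) : Decidable (Spec_search_skewed limit max_exp F L exponent sum_L sum_F out) := by unfold Spec_search_skewed; infer_instance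

-- ===== CLAIM (what is proved, stated in full; the proofs are below) =====
def Claim_equal_search_skewed : Prop := ∀ (limit : Int) (max_exp : Int) (F : List Int) (L : List Int) (exponent : Int) (sum_L : Int) (sum_F : Int), Dom_search_skewed limit max_exp F L exponent sum_L sum_F → Pre_search_skewed limit max_exp F L exponent sum_L sum_F → Spec_search_skewed limit max_exp F L exponent sum_L sum_F (search_skewed limit max_exp F L exponent sum_L sum_F)

-- ===== LEMMAS AND PROOFS =====
theorem whileA_eq_sum (limit max_exp : Int) (F L : List Int) : ∀ (k : Nat) (e sL sF : Int), (max_exp + 1 - e).toNat = k →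
    searchWhileA limit max_exp F L e sL sF =
      ((PySem.List.pyRange e (max_exp + 1) 1).map
        (fun p => search_skewed limit max_exp F L (p + 1)
          (sL + pget_L p L + pget_L (-(p + 1)) L)
          (sF + pget_F p F + pget_F (-(p + 1)) F))).sum := by
  intro k
  induction k with
  | zero =>
    intro e sL sF h
    rw [searchWhileA, PySem.List.pyRange_one_eq_nil (by omega), if_neg (by omega : ¬ e ≤ max_exp)]
    simp
  | succ k ih =>
    intro e sL sF h
    rw [searchWhileA, PySem.List.pyRange_one_cons (by omega), if_pos (by omega : e ≤ max_exp)]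
    simp only [List.map_cons, List.sum_cons]
    rw [ih (e + 1) sL sF (by omega)]

theorem altLoop_eq (limit max_exp : Int) (F L : List Int) (stack : List (Int × Int × Int)) (total : Int) :
    altLoop limit max_exp F L stack total =
      total + (stack.map (fun t => search_skewed limit max_exp F L t.1 t.2.1 t.2.2)).sum := by
  fun_induction altLoop limit max_exp F L stack total with
  | case1 => simp
  | case2 total e sL sF rest h ih =>
    rw [ih]
    simp only [List.map_cons, List.sum_cons]
    rw [search_skewed, if_pos h]
    ring
  | case3 total e sL sF rest h total' d children ih =>
    rw [ih]
    have htd : d = if e = 0 then (1:Int) else e + 2 := by simp only [d, dite_eq_ite]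
    have htc : children = (PySem.List.pyRange d (max_exp + 1) 1).map
        (fun p => (p + 1, sL + pget_L p L + pget_L (-(p + 1)) L, sF + pget_F p F + pget_F (-(p + 1)) F)) := rfl
    have htt : total' = (if sF = 0 then
        (if 1 ≤ PySem.Int.floordiv sL 2 ∧ PySem.Int.floordiv sL 2 ≤ limit then total + PySem.Int.floordiv sL 2 else total)
      else total) := by simp only [total', dite_eq_ite]
    rw [htt, htc, htd]
    simp only [List.map_cons, List.sum_cons, List.map_append, List.map_reverse,
      List.sum_append, List.sum_reverse, List.map_map, Function.comp_def]
    rw [search_skewed, if_neg h]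
    rw [← whileA_eq_sum limit max_exp F L ((max_exp + 1 - (if e = 0 then (1:Int) else e + 2)).toNat) (if e = 0 then (1:Int) else e + 2) sL sF rfl]
    split_ifs <;> (try simp_all) <;> (try ring)


-- ===== VERDICT (by name: the statement is the Claim_ definition above) =====
theorem search_skewed_spec : Claim_equal_search_skewed := by
  intro limit max_exp F L exponent sum_L sum_F _ _
  unfold Spec_search_skewed search_skewed_alt
  rw [altLoop_eq]
  simp
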